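-- pv_equiv track=rewrite | github.com/j7bhtx86cm-tech/bestprice | backend/bestprice_v12/matching_rules.py | detect_main_ingredient
-- ===== SOURCE A (Python) =====
-- from typing import Dict, List, Optional, Tuple, Any
--
-- def detect_main_ingredient(text: str, lexicon: Dict) -> Optional[str]:
--     """Detect main_ingredient from text using lexicon synonyms."""
--     synonyms = lexicon.get('ingredient_synonyms', {})
--
--     # Sort by token length
--     sorted_synonyms = sorted(
--         [(ing, tokens) for ing, tokens in synonyms.items()],
--         key=lambda x: -max(len(t) for t in x[1]) if x[1] else 0
--     )
--
--     for ingredient, tokens in sorted_synonyms: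
--         for token in tokens:
--             if token.lower() in text:
--                 return ingredient
--
--     return None
-- ===== SOURCE B (Python) =====
-- from typing import Dict, Optional
--
-- def detect_main_ingredient(text: str, lexicon: Dict) -> Optional[str]:
--     """One pass, no sort: keep the matched ingredient with the greatest
--     max-token-length; strict '>' replacement reproduces the stable-sort
--     tie-break (first in insertion order wins on equal rank)."""
--     best = None  # (rank, ingredient)
--     for ingredient, tokens in lexicon.get('ingredient_synonyms', {}).items():
--         if any(t.lower() in text for t in tokens):
--             rank = max(len(t) for t in tokens)
--             if best is None or rank > best[0]:
--                 best = (rank, ingredient)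
--     return best[1] if best is not None else None
-- ===== Notes on version B (the rewrite author's own statement) =====
-- stated objective: alternative
-- what changed: Drops the sort entirely: a single pass over the synonym dict keeps the matched ingredient with the greatest max-token-length (strict '>' replacement reproduces the stable sort's insertion-order tie-break).
import Mathlib
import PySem

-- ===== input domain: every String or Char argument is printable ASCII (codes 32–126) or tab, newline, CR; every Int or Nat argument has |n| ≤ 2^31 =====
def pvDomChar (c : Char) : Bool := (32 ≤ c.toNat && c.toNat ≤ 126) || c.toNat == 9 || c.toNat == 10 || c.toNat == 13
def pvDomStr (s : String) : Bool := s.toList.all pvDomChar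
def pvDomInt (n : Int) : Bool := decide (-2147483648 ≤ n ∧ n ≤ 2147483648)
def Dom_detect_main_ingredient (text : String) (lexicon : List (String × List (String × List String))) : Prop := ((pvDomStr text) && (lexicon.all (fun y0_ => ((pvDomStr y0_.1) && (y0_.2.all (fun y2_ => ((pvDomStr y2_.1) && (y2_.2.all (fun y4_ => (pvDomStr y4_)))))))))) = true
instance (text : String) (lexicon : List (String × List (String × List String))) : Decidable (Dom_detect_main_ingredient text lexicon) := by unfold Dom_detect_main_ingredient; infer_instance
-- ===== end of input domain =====

-- B drops A's sort: one pass keeping the matched ingredient of greatest max-token-length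
-- (strict '>' replacement reproduces the stable sort's insertion-order tie-break).

-- shared transliterations of subexpressions both Pythons contain:
-- 'any(token.lower() in text for token in tokens)' and 'max(len(t) for t in tokens)'
def pvMatched (text : String) (p : String × List String) : Bool :=
  p.2.any (fun tok => PySem.Str.isIn (PySem.Str.lower tok) text)

def pvMaxLen (tokens : List String) : Int :=
  match tokens with
  | [] => 0
  | t :: ts => ts.foldl (fun m s => max m (PySem.Str.len s)) (PySem.Str.len t)

-- ===== PORT A =====
-- '-max(len(t) for t in x[1]) if x[1] else 0'
def pvKeyA (p : String × List String) : Int :=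
  match p.2 with
  | [] => 0
  | t :: ts => -(ts.foldl (fun m s => max m (PySem.Str.len s)) (PySem.Str.len t))

-- 'for ingredient, tokens in sorted_synonyms: for token in tokens: if …: return ingredient'
def pvALoop (text : String) : List (String × List String) → Option String
  | [] => none
  | p :: rest => if pvMatched text p then some p.1 else pvALoop text rest

def detect_main_ingredient (text : String) (lexicon : List (String × List (String × List String))) : Option String :=
  let synonyms := (List.lookup "ingredient_synonyms" lexicon).getD []
  let sorted_synonyms := PySem.List.sorted synonyms pvKeyA
  pvALoop text sorted_synonyms

-- ===== PORT B =====
def detect_main_ingredient_alt (text : String) (lexicon : List (String × List (String × List String))) : Option String :=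
  let synonyms := (List.lookup "ingredient_synonyms" lexicon).getD []
  let best := synonyms.foldl (fun best p =>
    if pvMatched text p then
      let rank := pvMaxLen p.2
      match best with
      | none => some (rank, p.1)
      | some (r, i) => if rank > r then some (rank, p.1) else some (r, i)
    else best) none
  best.map (·.2)

-- ===== PRECONDITION & SPEC =====
def Spec_detect_main_ingredient (text : String) (lexicon : List (String × List (String × List String))) (out : Option String) : Prop := out = detect_main_ingredient_alt text lexicon
instance (text : String) (lexicon : List (String × List (String × List String))) (out : Option String) : Decidable (Spec_detect_main_ingredient text lexicon out) := by unfold Spec_detect_main_ingredient; infer_instance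

-- ===== CLAIM (what is proved, stated in full; the proofs are below) =====
def Claim_equal_detect_main_ingredient : Prop := ∀ (text : String) (lexicon : List (String × List (String × List String))), Dom_detect_main_ingredient text lexicon → Spec_detect_main_ingredient text lexicon (detect_main_ingredient text lexicon)

-- ===== LEMMAS AND PROOFS =====

-- A's for-loop is find? of the match test, projected to the name
theorem pvALoop_eq_find? (text : String) (l : List (String × List String)) :
    pvALoop text l = (l.find? (pvMatched text)).map (·.1) := by
  induction l with
  | nil => rfl
  | cons p rest ih =>
    by_cases h : pvMatched text p <;> simp [pvALoop, h, ih]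

-- a matched pair has nonempty tokens, so A's key is the negated rank
theorem pvKeyA_of_matched (text : String) (p : String × List String)
    (h : pvMatched text p = true) : pvKeyA p = -(pvMaxLen p.2) := by
  rcases p with ⟨i, tokens⟩
  cases tokens with
  | nil => simp [pvMatched] at h
  | cons t ts => simp [pvKeyA, pvMaxLen]

-- inserting an element the predicate rejects does not change find?
theorem find?_insertBy_neg {α : Type} (bf : α → α → Bool) (p : α → Bool) (x : α)
    (l : List α) (hx : p x = false) :
    (PySem.List.insertBy bf x l).find? p = l.find? p := by
  induction l with
  | nil => simp [PySem.List.insertBy, List.find?, hx]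
  | cons y ys ih =>
    by_cases hb : bf x y = true
    · simp [PySem.List.insertBy, hb, List.find?_cons, hx]
    · by_cases hy : p y = true <;>
        simp [PySem.List.insertBy, hb, hy, ih]

-- insertBy with the sort's comparison keeps the list key-sorted
theorem pairwise_insertBy (x : String × List String) (l : List (String × List String))
    (hl : l.Pairwise (fun a b => pvKeyA a ≤ pvKeyA b)) :
    (PySem.List.insertBy (fun a b => decide (pvKeyA a < pvKeyA b)) x l).Pairwise
      (fun a b => pvKeyA a ≤ pvKeyA b) := by
  induction l with
  | nil => simp [PySem.List.insertBy]
  | cons y ys ih =>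
    rcases List.pairwise_cons.mp hl with ⟨hy, hys⟩
    by_cases hb : pvKeyA x < pvKeyA y
    · simp only [PySem.List.insertBy, decide_eq_true_eq, if_pos hb]
      refine List.pairwise_cons.mpr ⟨?_, hl⟩
      intro z hz
      rcases List.mem_cons.mp hz with hz | hz
      · subst hz; exact le_of_lt hb
      · exact le_trans (le_of_lt hb) (hy z hz)
    · simp only [PySem.List.insertBy, decide_eq_true_eq, if_neg hb]
      refine List.pairwise_cons.mpr ⟨?_, ih hys⟩
      intro z hz
      rcases (PySem.List.mem_insertBy _ x z ys).mp hz with hz | hz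
      · subst hz; exact le_of_not_gt hb
      · exact hy z hz

-- find? after inserting an accepted element into a key-sorted list:
-- the new element wins exactly when its key is strictly smaller
theorem find?_insertBy_pos (p : (String × List String) → Bool) (x : String × List String)
    (l : List (String × List String)) (hx : p x = true)
    (hl : l.Pairwise (fun a b => pvKeyA a ≤ pvKeyA b)) :
    (PySem.List.insertBy (fun a b => decide (pvKeyA a < pvKeyA b)) x l).find? p =
      match l.find? p with
      | none => some x
      | some b => if pvKeyA x < pvKeyA b then some x else some b := by
  induction l with
  | nil => simp [PySem.List.insertBy, List.find?, hx]
  | cons y ys ih =>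
    rcases List.pairwise_cons.mp hl with ⟨hy, hys⟩
    by_cases hb : pvKeyA x < pvKeyA y
    · simp only [PySem.List.insertBy, decide_eq_true_eq, if_pos hb]
      by_cases hpy : p y = true
      · simp [hx, hpy, hb]
      · cases hfy : ys.find? p with
        | none => simp [hx, hpy, hfy]
        | some b =>
          have hbmem := List.mem_of_find?_eq_some hfy
          have hxb : pvKeyA x < pvKeyA b := lt_of_lt_of_le hb (hy b hbmem)
          simp [hx, hpy, hfy, hxb]
    · simp only [PySem.List.insertBy, decide_eq_true_eq, if_neg hb]
      by_cases hpy : p y = true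
      · simp [hpy, not_lt_of_ge (le_of_not_gt hb)]
      · simp only [List.find?_cons, hpy]
        exact ih hys

-- main invariant: B's running best equals the (rank, name) of the first match
-- in the insertion-sorted prefix that A will scan
theorem loop_inv (text : String) (syns : List (String × List String))
    (S : List (String × List String)) (best : Option (Int × String))
    (hS : S.Pairwise (fun a b => pvKeyA a ≤ pvKeyA b))
    (hbest : (S.find? (pvMatched text)).map (fun p => (pvMaxLen p.2, p.1)) = best) :
    ((syns.foldl (fun acc x => PySem.List.insertBy (fun a b => decide (pvKeyA a < pvKeyA b)) x acc) S).find?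
        (pvMatched text)).map (fun p => (pvMaxLen p.2, p.1)) =
      syns.foldl (fun best p =>
        if pvMatched text p then
          let rank := pvMaxLen p.2
          match best with
          | none => some (rank, p.1)
          | some (r, i) => if rank > r then some (rank, p.1) else some (r, i)
        else best) best := by
  induction syns generalizing S best with
  | nil => simpa using hbest
  | cons x xs ih =>
    simp only [List.foldl_cons]
    by_cases hx : pvMatched text x = true
    · refine ih _ _ (pairwise_insertBy x S hS) ?_
      rw [find?_insertBy_pos _ x S hx hS]
      cases hfS : S.find? (pvMatched text) with
      | none =>
        have : best = none := by simpa [hfS] using hbest.symm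
        simp [this, hx]
      | some b =>
        have hbm : pvMatched text b = true := List.find?_some hfS
        have hbv : best = some (pvMaxLen b.2, b.1) := by simpa [hfS] using hbest.symm
        have hkx := pvKeyA_of_matched text x hx
        have hkb := pvKeyA_of_matched text b hbm
        by_cases hlt : pvMaxLen b.2 < pvMaxLen x.2
        · have : pvKeyA x < pvKeyA b := by rw [hkx, hkb]; omega
          simp [this, hbv, hx, hlt]
        · have : ¬ pvKeyA x < pvKeyA b := by rw [hkx, hkb]; omega
          simp [this, hbv, hx, hlt]
    · refine ih _ _ (pairwise_insertBy x S hS) ?_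
      rw [find?_insertBy_neg _ _ x S (by simpa using hx)]
      simp [hbest, hx]

-- the two loop results, stated over the shared synonym list
theorem main_eq (text : String) (syns : List (String × List String)) :
    pvALoop text (PySem.List.sorted syns pvKeyA) =
      (syns.foldl (fun best p =>
        if pvMatched text p then
          let rank := pvMaxLen p.2
          match best with
          | none => some (rank, p.1)
          | some (r, i) => if rank > r then some (rank, p.1) else some (r, i)
        else best) none).map (·.2) := by
  rw [pvALoop_eq_find?, PySem.List.sorted_eq_foldl_insertBy,
    ← loop_inv text syns [] none (by simp) (by simp)]
  cases (syns.foldl (fun acc x => PySem.List.insertBy (fun a b => decide (pvKeyA a < pvKeyA b)) x acc) []).find?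
      (pvMatched text) with
  | none => rfl
  | some p => rfl

-- ===== VERDICT (by name: the statement is the Claim_ definition above) =====
theorem detect_main_ingredient_spec : Claim_equal_detect_main_ingredient := by
  intro text lexicon _
  exact main_eq text ((List.lookup "ingredient_synonyms" lexicon).getD [])
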